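-- pv_equiv track=rewrite | github.com/MilosCicmanec/CodeForces | 800-elo/binary_string_battle.py | bob
-- ===== SOURCE A (Python) =====
-- def bob(arr, length):
--     cur = sum(arr[:length])
--     l = 0
--     r = length - 1
--     best = [cur, (l, r)]  # Initialize with actual sum
--
--     while r + 1 < len(arr):
--         cur -= arr[l]
--         cur += arr[r + 1]
--         l += 1
--         r += 1
--         if cur < best[0]:
--             best[0] = cur
--             best[1] = (l, r)
--     return best[1]
-- ===== SOURCE B (Python) =====
-- def bob(arr, length):
--     n = len(arr)
--     pref = [0]
--     for x in arr:
--         pref.append(pref[-1] + x)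
--     best_sum = pref[min(length, n)]
--     best = (0, length - 1)
--     for i in range(1, n - length + 1):
--         cur = pref[i + length] - pref[i]
--         if cur < best_sum:
--             best_sum = cur
--             best = (i, i + length - 1)
--     return best
-- ===== Notes on version B (the rewrite author's own statement) =====
-- stated objective: alternative
-- what changed: Replaces the in-place sliding-window state machine (mutable cur/l/r updated per step) by a precomputed prefix-sum array with each window sum obtained as pref[i+length]-pref[i] in an indexed for-loop.
import Mathlib
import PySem

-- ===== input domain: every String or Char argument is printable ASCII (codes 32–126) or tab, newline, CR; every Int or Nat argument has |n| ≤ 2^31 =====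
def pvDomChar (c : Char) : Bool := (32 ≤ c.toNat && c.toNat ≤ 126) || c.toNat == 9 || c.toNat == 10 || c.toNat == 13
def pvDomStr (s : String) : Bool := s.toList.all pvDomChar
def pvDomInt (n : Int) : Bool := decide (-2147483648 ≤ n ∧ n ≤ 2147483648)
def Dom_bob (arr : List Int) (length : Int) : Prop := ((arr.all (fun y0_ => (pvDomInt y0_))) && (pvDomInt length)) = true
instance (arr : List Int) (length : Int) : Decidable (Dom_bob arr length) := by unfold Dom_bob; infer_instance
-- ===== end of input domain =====

-- B replaces A's in-place sliding-window state machine by a prefix-sum array with window sums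
-- read off as differences (objective: alternative decomposition, same O(n) cost).

-- ===== PORT A =====
-- A's while loop; the fuel is the number of iterations, (len(arr) - length).toNat,
-- which for 0 ≤ length (Pre_) is exactly how often `r + 1 < len(arr)` holds.
def bobLoop (arr : List Int) : Nat → Int → Int → Int → Int × (Int × Int) → Int × (Int × Int)
  | 0, _, _, _, best => best
  | fuel + 1, cur, l, r, best =>
      let cur' := cur - PySem.List.pyGetD arr l 0 + PySem.List.pyGetD arr (r + 1) 0
      let l' := l + 1
      let r' := r + 1
      let best' := if cur' < best.1 then (cur', (l', r')) else best
      bobLoop arr fuel cur' l' r' best'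

-- cur = sum(arr[:length]); l = 0; r = length - 1; best = [cur, (l, r)]; then the while loop
def bob (arr : List Int) (length : Int) : Int × Int :=
  (bobLoop arr ((arr.length : Int) - length).toNat
    (PySem.List.slice arr none (some length)).sum 0 (length - 1)
    ((PySem.List.slice arr none (some length)).sum, (0, length - 1))).2

-- ===== PORT B =====
-- pref = [0]; for x in arr: pref.append(pref[-1] + x)
def buildPref (arr : List Int) : List Int :=
  arr.foldl (fun p x => p ++ [PySem.List.pyGetD p (-1) 0 + x]) [0]

-- best_sum = pref[min(length, n)]; best = (0, length - 1); for i in range(1, n - length + 1): ...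
def bob_alt (arr : List Int) (length : Int) : Int × Int :=
  ((PySem.List.pyRange 1 ((arr.length : Int) - length + 1) 1).foldl
    (fun st i =>
      if PySem.List.pyGetD (buildPref arr) (i + length) 0
           - PySem.List.pyGetD (buildPref arr) i 0 < st.1
      then (PySem.List.pyGetD (buildPref arr) (i + length) 0
              - PySem.List.pyGetD (buildPref arr) i 0, (i, i + length - 1))
      else st)
    (PySem.List.pyGetD (buildPref arr) (min length (arr.length : Int)) 0, (0, length - 1))).2

-- ===== PRECONDITION & SPEC =====
-- Pre_ excludes length < 0: there A's while condition r+1 < len(arr) holds at once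
-- (r+1 is negative) and arr[l]/arr[r+1] run out of range — A raises IndexError on
-- every negative length, even for empty arr.
def Pre_bob (arr : List Int) (length : Int) : Prop := 0 ≤ length
instance (arr : List Int) (length : Int) : Decidable (Pre_bob arr length) := by unfold Pre_bob; infer_instance

def pvWitness_bob : List Int × Int := ([3, -1, 4, -1, 5], 2)

def Spec_bob (arr : List Int) (length : Int) (out : Int × Int) : Prop := out = bob_alt arr length
instance (arr : List Int) (length : Int) (out : Int × Int) : Decidable (Spec_bob arr length out) := by unfold Spec_bob; infer_instance

-- ===== CLAIM (what is proved, stated in full; the proofs are below) =====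
def Claim_equal_bob : Prop := ∀ (arr : List Int) (length : Int), Dom_bob arr length → Pre_bob arr length → Spec_bob arr length (bob arr length)

-- ===== LEMMAS AND PROOFS =====

-- prefix sums of arr starting from a running total s
def psums (s : Int) : List Int → List Int
  | [] => []
  | x :: xs => (s + x) :: psums (s + x) xs

-- "T arr j" = sum of the first j elements (Python's pref[j] for 0 ≤ j ≤ len(arr))
def T (arr : List Int) (j : Int) : Int := (arr.take j.toNat).sum

lemma buildPref_aux (arr : List Int) : ∀ (p : List Int) (s : Int),
    PySem.List.pyGetD p (-1) 0 = s →
    arr.foldl (fun p x => p ++ [PySem.List.pyGetD p (-1) 0 + x]) p = p ++ psums s arr := by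
  induction arr with
  | nil => intro p s _; simp [psums]
  | cons x xs ih =>
      intro p s hs
      simp only [List.foldl_cons, hs]
      rw [ih (p ++ [s + x]) (s + x) (PySem.List.pyGetD_neg_one_append_singleton p (s + x) 0)]
      simp [psums]

lemma buildPref_eq (arr : List Int) : buildPref arr = 0 :: psums 0 arr := by
  unfold buildPref
  rw [buildPref_aux arr [0] 0 (by decide)]
  rfl

lemma psums_getD (arr : List Int) : ∀ (s : Int) (k : Nat), k < arr.length →
    (psums s arr).getD k 0 = s + (arr.take (k + 1)).sum := by
  induction arr with
  | nil => intro s k hk; simp at hk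
  | cons x xs ih =>
      intro s k hk
      cases k with
      | zero => simp [psums]
      | succ k =>
          simp only [psums, List.getD_cons_succ]
          rw [ih (s + x) k (by simpa using hk)]
          simp [List.take_succ_cons]
          ring

lemma pref_getD (arr : List Int) (j : Int) (h0 : 0 ≤ j) (hn : j ≤ (arr.length : Int)) :
    PySem.List.pyGetD (buildPref arr) j 0 = T arr j := by
  rw [buildPref_eq, PySem.List.pyGetD_of_nonneg _ _ h0]
  rcases Nat.eq_zero_or_eq_succ_pred j.toNat with hj | hj
  · simp [hj, T]
  · obtain ⟨k, hk2⟩ : ∃ k, j.toNat = k + 1 := ⟨j.toNat - 1, by omega⟩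
    have hk : k < arr.length := by omega
    rw [hk2, List.getD_cons_succ, psums_getD arr 0 k hk]
    simp only [T, zero_add, hk2]

-- pref[j+1] = pref[j] + arr[j]
lemma T_succ (arr : List Int) (j : Int) (h0 : 0 ≤ j) (hn : j < (arr.length : Int)) :
    T arr (j + 1) = T arr j + PySem.List.pyGetD arr j 0 := by
  unfold T
  rw [PySem.List.pyGetD_eq_getElem _ _ h0 hn]
  have h1 : (j + 1).toNat = j.toNat + 1 := by omega
  rw [h1, List.take_add_one, List.sum_append]
  have : arr[j.toNat]? = some arr[j.toNat] := List.getElem?_eq_getElem (by omega)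
  simp [this]

-- A's loop and B's fold carry the identical state step for step.
lemma loop_eq (arr : List Int) (length : Int) (hl : 0 ≤ length) :
    ∀ (m : Nat) (i : Int) (b : Int × (Int × Int)), 0 ≤ i →
      i + m + length = (arr.length : Int) →
      bobLoop arr m (T arr (i + length) - T arr i) i (i + length - 1) b
        = (PySem.List.pyRange (i + 1) ((arr.length : Int) - length + 1) 1).foldl
            (fun st k =>
              let cur := PySem.List.pyGetD (buildPref arr) (k + length) 0
                           - PySem.List.pyGetD (buildPref arr) k 0
              if cur < st.1 then (cur, (k, k + length - 1)) else st) b := by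
  intro m
  induction m with
  | zero =>
      intro i b h0 hend
      rw [PySem.List.pyRange_one_eq_nil (by omega)]
      rfl
  | succ m ih =>
      intro i b h0 hend
      have hi : i < (arr.length : Int) := by omega
      have hil : i + length < (arr.length : Int) := by omega
      have hstep : T arr (i + length) - T arr i
            - PySem.List.pyGetD arr i 0 + PySem.List.pyGetD arr (i + length - 1 + 1) 0
          = T arr (i + 1 + length) - T arr (i + 1) := by
        have e1 := T_succ arr i h0 hi
        have e2 := T_succ arr (i + length) (by omega) hil
        have : i + length - 1 + 1 = i + length := by ring
        rw [this]
        have : i + 1 + length = i + length + 1 := by ring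
        rw [this, e1, e2]
        ring
      rw [PySem.List.pyRange_one_cons (by omega)]
      simp only [List.foldl_cons]
      show bobLoop arr m _ _ _ _ = _
      rw [hstep]
      have hcur : PySem.List.pyGetD (buildPref arr) (i + 1 + length) 0
            - PySem.List.pyGetD (buildPref arr) (i + 1) 0
          = T arr (i + 1 + length) - T arr (i + 1) := by
        rw [pref_getD arr (i + 1 + length) (by omega) (by omega),
            pref_getD arr (i + 1) (by omega) (by omega)]
      have harg : i + length - 1 + 1 = i + 1 + length - 1 := by ring
      rw [harg]
      have := ih (i + 1) (if T arr (i + 1 + length) - T arr (i + 1) < b.1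
          then (T arr (i + 1 + length) - T arr (i + 1), (i + 1, i + 1 + length - 1)) else b)
        (by omega) (by push_cast at hend ⊢; omega)
      rw [this]
      simp only [hcur]

lemma init_sum (arr : List Int) (length : Int) (hl : 0 ≤ length) :
    (PySem.List.slice arr none (some length)).sum
      = PySem.List.pyGetD (buildPref arr) (min length (arr.length : Int)) 0 := by
  rw [PySem.List.slice_to _ hl,
      pref_getD arr (min length (arr.length : Int)) (by omega) (by omega)]
  unfold T
  congr 1
  rw [List.take_eq_take_iff]
  omega

-- ===== VERDICT (by name: the statement is the Claim_ definition above) =====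
theorem bob_spec : Claim_equal_bob := by
  intro arr length _ hpre
  have hl : 0 ≤ length := hpre
  unfold Spec_bob bob bob_alt
  rw [init_sum arr length hpre]
  by_cases hle : length ≤ (arr.length : Int)
  · have hmin : min length (arr.length : Int) = length := by omega
    have h := loop_eq arr length hpre ((arr.length : Int) - length).toNat 0
      (PySem.List.pyGetD (buildPref arr) (min length (arr.length : Int)) 0, (0, length - 1))
      le_rfl (by omega)
    have hT0 : T arr (0 + length) - T arr 0 = T arr length := by simp [T]
    rw [hT0] at h
    have hTl : T arr length = PySem.List.pyGetD (buildPref arr) (min length (arr.length : Int)) 0 := by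
      rw [pref_getD arr _ (by omega) (by omega)]
      unfold T; congr 1; rw [List.take_eq_take_iff]; omega
    rw [hTl] at h
    have hr : (0 : Int) + length - 1 = length - 1 := by ring
    rw [hr] at h
    rw [h]
    norm_num
  · have hfuel : ((arr.length : Int) - length).toNat = 0 := by omega
    rw [hfuel, PySem.List.pyRange_one_eq_nil (by omega)]
    rfl
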